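-- pv_equiv track=rewrite | github.com/jpb7/CS-350 | hw5.py | isForrest
-- ===== SOURCE A (Python) =====
-- def isForrest(g):
--     """
--     >>> isForrest([[1,2], [3,4], [5,6], [], [], [], []])
--     True
--     >>> isForrest([[1,2], [3,4], [5,4], [], [], []])
--     False
--     """
--     A = set()
--     for edges in g:
--         for edge in edges:
--             if edge in A:
--                 return False
--             A.add(edge)
--     return True
-- ===== SOURCE B (Python) =====
-- def isForrest(g):
--     edges = sorted(e for adj in g for e in adj)
--     return all(a != b for a, b in zip(edges, edges[1:]))
-- ===== Notes on version B (the rewrite author's own statement) =====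
-- stated objective: alternative
-- what changed: Replaces A's early-exit nested loop with a hash-set membership test per edge by sort-then-scan: flatten all adjacency lists, sort the edges, and check that no two adjacent sorted edges are equal (duplicates are adjacent after sorting).
import Mathlib
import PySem

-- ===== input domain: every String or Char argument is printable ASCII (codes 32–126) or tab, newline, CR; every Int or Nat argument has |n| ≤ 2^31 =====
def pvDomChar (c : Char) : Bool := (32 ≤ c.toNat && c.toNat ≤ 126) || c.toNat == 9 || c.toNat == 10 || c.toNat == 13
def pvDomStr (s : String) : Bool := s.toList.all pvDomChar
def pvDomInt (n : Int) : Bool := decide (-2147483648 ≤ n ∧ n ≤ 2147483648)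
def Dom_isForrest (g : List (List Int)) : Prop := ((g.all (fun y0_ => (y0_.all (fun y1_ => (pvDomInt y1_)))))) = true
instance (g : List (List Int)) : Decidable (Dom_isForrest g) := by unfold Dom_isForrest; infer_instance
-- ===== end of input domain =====

-- B sorts the flattened edge list and scans adjacent pairs for duplicates,
-- replacing A's hash-set early-exit nested loop (objective: alternative algorithm, sort-then-scan).


-- ===== PORT A =====
-- inner loop: 'for edge in edges: if edge in A: return False; A.add(edge)' — none = early return False
def isForrestInner (A : PySem.Set Int) : List Int → Option (PySem.Set Int)
  | [] => some A
  | e :: es => if A.contains e then none else isForrestInner (PySem.Set.add A e) es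

-- outer loop: 'for edges in g: …'
def isForrestOuter (A : PySem.Set Int) : List (List Int) → Bool
  | [] => true
  | edges :: rest =>
    match isForrestInner A edges with
    | none => false
    | some A' => isForrestOuter A' rest

def isForrest (g : List (List Int)) : Bool := isForrestOuter PySem.Set.empty g

-- ===== PORT B =====
def isForrest_alt (g : List (List Int)) : Bool :=
  let edges := PySem.List.sorted (g.flatMap (fun adj => adj)) (fun x => x) false
  (edges.zip edges.tail).all (fun p => p.1 != p.2)   -- all(a != b for a, b in zip(edges, edges[1:]))

-- ===== PRECONDITION & SPEC =====
def Spec_isForrest (g : List (List Int)) (out : Bool) : Prop := out = isForrest_alt g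
instance (g : List (List Int)) (out : Bool) : Decidable (Spec_isForrest g out) := by unfold Spec_isForrest; infer_instance

-- ===== CLAIM (what is proved, stated in full; the proofs are below) =====
def Claim_equal_isForrest : Prop := ∀ (g : List (List Int)), Dom_isForrest g → Spec_isForrest g (isForrest g)

-- ===== LEMMAS AND PROOFS =====

-- A-side characterisation: the set-accumulating loop decides Nodup of the flattened edges
theorem set_add_of_not_mem (A : PySem.Set Int) (x : Int) (h : x ∉ A) : PySem.Set.add A x = A ++ [x] := by
  simp [PySem.Set.add, PySem.Set.contains, h]

theorem inner_some (A : PySem.Set Int) (es : List Int) (h : (A ++ es).Nodup) :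
    isForrestInner A es = some (A ++ es) := by
  induction es generalizing A with
  | nil => simp [isForrestInner]
  | cons e es ih =>
    have hne : e ∉ A := by
      intro hmem
      have := h.disjoint hmem
      simp at this
    have : (A ++ [e] ++ es).Nodup := by simpa using h
    rw [isForrestInner]
    simp only [PySem.Set.contains, List.contains_eq_mem, hne, decide_false, Bool.false_eq_true,
      if_false, set_add_of_not_mem A e hne, ih _ this]
    simp

theorem inner_none (A : PySem.Set Int) (es : List Int) (hA : A.Nodup) (h : ¬ (A ++ es).Nodup) :
    isForrestInner A es = none := by
  induction es generalizing A with
  | nil => simp at h; exact absurd hA h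
  | cons e es ih =>
    by_cases hne : e ∈ A
    · simp [isForrestInner, PySem.Set.contains, hne]
    · have hA' : (A ++ [e]).Nodup := by
        simp [List.nodup_append, hA]
        exact fun a ha he => hne (he ▸ ha)
      have h' : ¬ (A ++ [e] ++ es).Nodup := by
        intro hc; exact h (by simpa using hc)
      rw [isForrestInner]
      simp only [PySem.Set.contains, List.contains_eq_mem, hne, decide_false, Bool.false_eq_true,
        if_false, set_add_of_not_mem A e hne]
      exact ih _ hA' h'

theorem outer_eq (A : PySem.Set Int) (g : List (List Int)) (hA : A.Nodup) :
    isForrestOuter A g = decide ((A ++ g.flatMap (fun adj => adj)).Nodup) := by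
  induction g generalizing A with
  | nil => simp [isForrestOuter, hA]
  | cons edges rest ih =>
    by_cases h : (A ++ edges).Nodup
    · have hs := inner_some A edges h
      simp only [isForrestOuter, hs, ih _ h, List.flatMap_cons, List.append_assoc]
    · rw [isForrestOuter, inner_none A edges hA h]
      have hng : ¬ (A ++ (edges :: rest).flatMap (fun adj => adj)).Nodup := by
        intro hc
        rw [List.flatMap_cons, ← List.append_assoc] at hc
        exact h (List.nodup_append.mp hc).1
      have hfl : List.flatMap (fun adj => adj) rest = rest.flatten := by
        simp [List.flatMap]
      simp only [List.flatMap_cons, hfl] at hng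
      simp [hng]

-- B-side: on a ≤-sorted list, the adjacent-pair scan decides Nodup (duplicates are adjacent)
theorem sorted_zip_nodup (s : List Int) (hs : s.Pairwise (· ≤ ·)) :
    (((s.zip s.tail).all (fun p => p.1 != p.2)) = true ↔ s.Nodup) := by
  induction s with
  | nil => simp
  | cons a t ih =>
    cases t with
    | nil => simp
    | cons b u =>
      rw [List.pairwise_cons] at hs
      obtain ⟨ha, ht⟩ := hs
      have hb := (List.pairwise_cons.mp ht).1
      have ihbu := ih ht
      simp only [List.tail_cons, List.zip_cons_cons, List.all_cons, Bool.and_eq_true, bne_iff_ne,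
        List.nodup_cons]
      constructor
      · rintro ⟨hab, hx⟩
        refine ⟨?_, List.nodup_cons.mp (ihbu.mp hx)⟩
        intro hmem
        rcases List.mem_cons.mp hmem with h | h
        · exact hab h
        · exact hab (le_antisymm (ha b (by simp)) (hb a h))
      · rintro ⟨hnot, hnd⟩
        exact ⟨fun h => hnot (h ▸ List.mem_cons_self), ihbu.mpr (List.nodup_cons.mpr hnd)⟩

theorem alt_eq (g : List (List Int)) :
    isForrest_alt g = decide ((g.flatMap (fun adj => adj)).Nodup) := by
  unfold isForrest_alt
  set l := g.flatMap (fun adj => adj) with hl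
  set s := PySem.List.sorted l (fun x => x) false with hsdef
  have hperm : s.Perm l := PySem.List.sorted_perm l (fun x => x) false
  have hpw : s.Pairwise (fun a b => (fun x => x) a ≤ (fun x => x) b) :=
    PySem.List.sorted_pairwise l (fun x => x)
  have hiff : ((s.zip s.tail).all (fun p => p.1 != p.2) = true) ↔ l.Nodup := by
    rw [sorted_zip_nodup s hpw]
    exact hperm.nodup_iff
  by_cases h : l.Nodup
  · simp [hiff.mpr h, h]
  · have : ¬ ((s.zip s.tail).all (fun p => p.1 != p.2) = true) := fun hc => h (hiff.mp hc)
    simp only [Bool.not_eq_true] at this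
    simp [this, h]

-- ===== VERDICT (by name: the statement is the Claim_ definition above) =====
theorem isForrest_spec : Claim_equal_isForrest := by
  intro g _
  unfold Spec_isForrest
  rw [alt_eq]
  unfold isForrest
  rw [outer_eq PySem.Set.empty g (by simp [PySem.Set.empty])]
  simp [PySem.Set.empty]
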